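-- pv_equiv track=rewrite | github.com/XBJF-X/KKneed | moudle/FindDownloadAddress.py | splicing
-- ===== SOURCE A (Python) =====
-- def splicing(var1, var2):  # 把.ts文件的前半部分和后半部分去除重合部分之后拼接在一起
--     # 以其中较短的字符串，从长到短依次循环匹配查找
--     str1 = var1.rstrip("/")
--     str1 = str1.replace("//", "/")
--     str2 = var2.lstrip("/")
--     f1 = ""
--     for i in range(2, min(len(str1), len(str2))):
--         if str1[-i:-1] + str1[-1] == str2[0:i]:
--             f1 = str2[0:i]
--
--     str3 = str1.replace(f1, "") + "/" + f1 + "/" + str2.replace(f1, "")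
--     str3 = str3.replace("//", "/")
--
--     x = str3.find('/')
--     # 在左边找到了反斜杠，则再加一个，保证以https://或者http://
--     if x != -1:
--         str3 = str3[:x] + "/" + str3[x:]
--     return str3
-- ===== SOURCE B (Python) =====
-- M = 2305843009213693951  # Mersenne prime 2^61 - 1
-- B = 131
--
-- def splicing(var1, var2):
--     # Rabin-Karp: precompute rolling prefix hashes of both strings once, then
--     # find the longest suffix(s1)/prefix(s2) overlap by O(1) hash comparisons,
--     # verifying characters only on a hash hit (the first hit is the answer).
--     s1 = var1.rstrip("/").replace("//", "/")
--     s2 = var2.lstrip("/")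
--     n = len(s1)
--     cap = min(n, len(s2)) - 1
--     h1 = [0]
--     for c in s1:
--         h1.append((h1[-1] * B + ord(c)) % M)
--     h2 = [0]
--     for c in s2:
--         h2.append((h2[-1] * B + ord(c)) % M)
--     f1 = ""
--     for k in range(cap, 1, -1):
--         if (h1[n] - h1[n - k] * pow(B, k, M)) % M == h2[k] and s1[n - k:] == s2[:k]:
--             f1 = s2[:k]
--             break
--     out = (s1.replace(f1, "") + "/" + f1 + "/" + s2.replace(f1, "")).replace("//", "/")
--     i = out.find("/")
--     return out if i == -1 else out[:i] + "/" + out[i:]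
-- ===== Notes on version B (the rewrite author's own statement) =====
-- stated objective: faster
-- what changed: B is a Rabin-Karp search: it precomputes rolling prefix hashes of both strings once and finds the longest suffix/prefix overlap by O(1) modular hash comparisons, verifying characters only on a hash hit, instead of A's loop that materialises and compares a pair of slices for every candidate length.
import Mathlib
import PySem

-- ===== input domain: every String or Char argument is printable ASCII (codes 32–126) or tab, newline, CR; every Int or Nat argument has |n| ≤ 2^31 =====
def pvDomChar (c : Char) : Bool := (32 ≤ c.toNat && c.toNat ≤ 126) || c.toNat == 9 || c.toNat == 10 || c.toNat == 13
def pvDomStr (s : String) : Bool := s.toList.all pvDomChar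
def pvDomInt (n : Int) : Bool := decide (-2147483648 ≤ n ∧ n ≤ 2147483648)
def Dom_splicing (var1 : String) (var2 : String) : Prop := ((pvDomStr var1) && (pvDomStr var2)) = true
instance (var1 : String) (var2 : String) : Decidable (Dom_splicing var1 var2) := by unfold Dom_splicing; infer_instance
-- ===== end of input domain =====

-- B is a Rabin-Karp search: rolling prefix hashes of both strings are built once and the
-- longest suffix/prefix overlap is found by O(1) modular hash comparisons, with a character
-- verification only on a hash hit; A compares a freshly built pair of slices for every length.

-- ===== PORT A =====
-- loop body of A: 'if str1[-i:-1] + str1[-1] == str2[0:i]: f1 = str2[0:i]'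
-- (str1[-1] is PySem.List.pyGet?; the none branch is Python's IndexError, unreachable
--  since the loop only runs with 2 ≤ i < len(str1))
def spliceBodyA (s1 s2 : List Char) (f : List Char) (i : Int) : List Char :=
  match PySem.List.pyGet? s1 (-1) with
  | none => f
  | some c =>
    if PySem.List.slice s1 (some (-i)) (some (-1)) ++ [c] = PySem.List.slice s2 (some 0) (some i)
    then PySem.List.slice s2 (some 0) (some i)
    else f

def splicing (var1 : String) (var2 : String) : String :=
  -- str1 = var1.rstrip("/")  (strip the chars {'/'} from the right: drop trailing '/'; exact)
  -- str1 = str1.replace("//", "/")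
  let str1 := PySem.Chars.replace ((var1.toList.reverse.dropWhile (· == '/')).reverse) ['/', '/'] ['/']
  -- str2 = var2.lstrip("/")  (drop leading '/'; exact)
  let str2 := var2.toList.dropWhile (· == '/')
  -- f1 = ""; for i in range(2, min(len(str1), len(str2))): …
  let f1 := (PySem.List.pyRange 2 (min (PySem.Chars.len str1) (PySem.Chars.len str2))).foldl
              (spliceBodyA str1 str2) []
  -- str3 = str1.replace(f1,"") + "/" + f1 + "/" + str2.replace(f1,"");  str3 = str3.replace("//","/")
  let str3 := PySem.Chars.replace
      (PySem.Chars.replace str1 f1 [] ++ ['/'] ++ f1 ++ ['/'] ++ PySem.Chars.replace str2 f1 [])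
      ['/', '/'] ['/']
  -- x = str3.find('/'); if x != -1: str3 = str3[:x] + "/" + str3[x:]
  let x := PySem.Chars.find str3 ['/']
  String.ofList (if x ≠ -1
             then PySem.List.slice str3 none (some x) ++ ['/'] ++ PySem.List.slice str3 (some x) none
             else str3)

-- ===== PORT B =====
-- module constants of Source B
def pvM : Int := 2305843009213693951
def pvB : Int := 131

-- one rolling-hash step: (h*B + ord(c)) % M  (Python '%' with a positive literal
-- modulus equals Lean's Int '%' (emod); ord(c) = the code point c.toNat — exact)
def hashStep (h : Int) (c : Char) : Int := (h * pvB + (c.toNat : Int)) % pvM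

-- 'h = [0]; for c in s: h.append((h[-1]*B + ord(c)) % M)' as the obvious structural recursion
def hprefs (h : Int) : List Char → List Int
  | [] => [h]
  | c :: cs => h :: hprefs (hashStep h c) cs

-- 'for k in range(cap, 1, -1): if <hash filter> and s1[n-k:] == s2[:k]: f1 = s2[:k]; break'
-- (list indices h1[n], h1[n-k], h2[k] are in range whenever the loop runs, so getD is exact;
--  pow(B, k, M) is B^k % M; the slice s1[n-k:] has a nonnegative start, i.e. List.drop)
def overlapB (s1 s2 : List Char) (h1 h2 : List Int) (n : Nat) : Nat → List Char
  | 0 => []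
  | 1 => []
  | (k+2) =>
    if (h1.getD n 0 - h1.getD (n - (k+2)) 0 * (pvB ^ (k+2) % pvM)) % pvM = h2.getD (k+2) 0
        ∧ s1.drop (n - (k+2)) = s2.take (k+2)
    then s2.take (k+2)
    else overlapB s1 s2 h1 h2 n (k+1)

def splicing_alt (var1 : String) (var2 : String) : String :=
  -- s1 = var1.rstrip("/").replace("//", "/");  s2 = var2.lstrip("/")
  let s1 := PySem.Chars.replace ((var1.toList.reverse.dropWhile (· == '/')).reverse) ['/', '/'] ['/']
  let s2 := var2.toList.dropWhile (· == '/')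
  let n := s1.length
  let cap := min n s2.length - 1
  let h1 := hprefs 0 s1
  let h2 := hprefs 0 s2
  let f1 := overlapB s1 s2 h1 h2 n cap
  -- out = (s1.replace(f1,"") + "/" + f1 + "/" + s2.replace(f1,"")).replace("//","/")
  let out := PySem.Chars.replace
      (PySem.Chars.replace s1 f1 [] ++ ['/'] ++ f1 ++ ['/'] ++ PySem.Chars.replace s2 f1 [])
      ['/', '/'] ['/']
  -- i = out.find("/"); return out if i == -1 else out[:i] + "/" + out[i:]
  let i := PySem.Chars.find out ['/']
  String.ofList (if i = -1
             then out
             else PySem.List.slice out none (some i) ++ ['/'] ++ PySem.List.slice out (some i) none)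

-- ===== PRECONDITION & SPEC =====
def Spec_splicing (var1 : String) (var2 : String) (out : String) : Prop := out = splicing_alt var1 var2
instance (var1 : String) (var2 : String) (out : String) : Decidable (Spec_splicing var1 var2 out) := by unfold Spec_splicing; infer_instance

-- ===== CLAIM (what is proved, stated in full; the proofs are below) =====
def Claim_equal_splicing : Prop := ∀ (var1 : String) (var2 : String), Dom_splicing var1 var2 → Spec_splicing var1 var2 (splicing var1 var2)

-- ===== LEMMAS AND PROOFS =====

lemma ite_ne_swap {α : Type} (p : Prop) [Decidable p] (a b : α) :
    (if ¬ p then a else b) = if p then b else a := by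
  by_cases h : p <;> simp [h]

lemma pvM_pos : (0 : Int) < pvM := by decide

-- a rolling hash of a nonempty list lands in [0, M)
lemma hash_range (b : List Char) (h : Int) (hne : b ≠ []) :
    0 ≤ b.foldl hashStep h ∧ b.foldl hashStep h < pvM := by
  induction b generalizing h with
  | nil => exact absurd rfl hne
  | cons c cs ih =>
    by_cases hc : cs = []
    · subst hc
      simp only [List.foldl, hashStep]
      exact ⟨Int.emod_nonneg _ (by decide), Int.emod_lt_of_pos _ pvM_pos⟩
    · simpa using ih (hashStep h c) hc

-- hprefs indexes to the hash of the corresponding prefix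
lemma hprefs_getD (s : List Char) (h : Int) (i : Nat) (hi : i ≤ s.length) :
    (hprefs h s).getD i 0 = (s.take i).foldl hashStep h := by
  induction s generalizing h i with
  | nil =>
    have : i = 0 := by simpa using hi
    subst this; simp [hprefs]
  | cons c cs ih =>
    cases i with
    | zero => simp [hprefs]
    | succ j =>
      simp only [hprefs, List.getD_cons_succ, List.take_succ_cons, List.foldl]
      exact ih (hashStep h c) j (by simpa using hi)

-- shifting the seed of a rolling hash: foldl from h ≡ h·B^len + foldl from 0  (mod M)
lemma foldl_hash_shift (b : List Char) (h : Int) :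
    b.foldl hashStep h ≡ h * pvB ^ b.length + b.foldl hashStep 0 [ZMOD pvM] := by
  induction b generalizing h with
  | nil => simp [Int.ModEq.refl]
  | cons c cs ih =>
    simp only [List.foldl, List.length_cons]
    calc cs.foldl hashStep (hashStep h c)
        ≡ hashStep h c * pvB ^ cs.length + cs.foldl hashStep 0 [ZMOD pvM] := ih _
      _ ≡ (h * pvB + (c.toNat : Int)) * pvB ^ cs.length + cs.foldl hashStep 0 [ZMOD pvM] := by
          exact Int.ModEq.add_right _ (Int.ModEq.mul_right _ (Int.emod_emod_of_dvd _ dvd_rfl))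
      _ = h * pvB ^ (cs.length + 1) + ((c.toNat : Int) * pvB ^ cs.length + cs.foldl hashStep 0) := by
          ring
      _ ≡ h * pvB ^ (cs.length + 1) + (hashStep 0 c * pvB ^ cs.length + cs.foldl hashStep 0) [ZMOD pvM] := by
          refine Int.ModEq.add_left _ (Int.ModEq.add_right _ (Int.ModEq.mul_right _ ?_))
          have : hashStep 0 c = (c.toNat : Int) % pvM := by simp [hashStep]
          rw [this]
          exact (Int.emod_emod_of_dvd _ dvd_rfl).symm
      _ ≡ h * pvB ^ (cs.length + 1) + cs.foldl hashStep (hashStep 0 c) [ZMOD pvM] := by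
          exact Int.ModEq.add_left _ (ih (hashStep 0 c)).symm

-- if the substrings are equal then the hash filter fires (completeness of the filter)
lemma hash_complete (s1 s2 : List Char) (k : Nat)
    (h2k : 2 ≤ k) (hk1 : k ≤ s1.length) (hk2 : k ≤ s2.length)
    (heq : s1.drop (s1.length - k) = s2.take k) :
    ((hprefs 0 s1).getD s1.length 0
      - (hprefs 0 s1).getD (s1.length - k) 0 * (pvB ^ k % pvM)) % pvM
    = (hprefs 0 s2).getD k 0 := by
  set d := s1.drop (s1.length - k) with hd
  have hdlen : d.length = k := by simp [hd]; omega
  have hdne : d ≠ [] := by intro h; rw [h] at hdlen; simp at hdlen; omega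
  have hsplit : s1 = s1.take (s1.length - k) ++ d := (List.take_append_drop _ _).symm
  set a := (s1.take (s1.length - k)).foldl hashStep 0 with ha
  have g1 : (hprefs 0 s1).getD s1.length 0 = s1.foldl hashStep 0 := by
    rw [hprefs_getD _ _ _ le_rfl, List.take_length]
  have g2 : (hprefs 0 s1).getD (s1.length - k) 0 = a := by
    rw [hprefs_getD _ _ _ (by omega)]
  have g3 : (hprefs 0 s2).getD k 0 = d.foldl hashStep 0 := by
    rw [hprefs_getD _ _ _ hk2, ← heq]
  rw [g1, g2, g3]
  have hfold : s1.foldl hashStep 0 = d.foldl hashStep a := by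
    conv_lhs => rw [hsplit]
    rw [List.foldl_append]
  have hcongr : s1.foldl hashStep 0 - a * (pvB ^ k % pvM) ≡ d.foldl hashStep 0 [ZMOD pvM] := by
    calc s1.foldl hashStep 0 - a * (pvB ^ k % pvM)
        ≡ s1.foldl hashStep 0 - a * pvB ^ k [ZMOD pvM] := by
          exact Int.ModEq.sub_left _ (Int.ModEq.mul_left _ (Int.emod_emod_of_dvd _ dvd_rfl))
      _ = d.foldl hashStep a - a * pvB ^ k := by rw [hfold]
      _ ≡ (a * pvB ^ d.length + d.foldl hashStep 0) - a * pvB ^ k [ZMOD pvM] := by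
          exact Int.ModEq.sub_right _ (foldl_hash_shift d a)
      _ = d.foldl hashStep 0 := by rw [hdlen]; ring
  have hrange := hash_range d 0 hdne
  calc (s1.foldl hashStep 0 - a * (pvB ^ k % pvM)) % pvM
      = d.foldl hashStep 0 % pvM := hcongr
    _ = d.foldl hashStep 0 := Int.emod_eq_of_lt hrange.1 hrange.2

-- in range, A's slice-and-compare body is exactly the substring-equality test
lemma spliceBodyA_eq (s1 s2 : List Char) (f : List Char) (i : Nat)
    (h2 : 2 ≤ i) (h1 : i < s1.length) (_hn2 : i ≤ s2.length) :
    spliceBodyA s1 s2 f (i : Int) =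
      if s1.drop (s1.length - i) = s2.take i then s2.take i else f := by
  have hne : s1 ≠ [] := List.ne_nil_of_length_pos (by omega)
  have hlast : PySem.List.pyGet? s1 (-1) = some (s1.getLast hne) := by
    rw [PySem.List.pyGet?_neg_one, List.getLast?_eq_some_getLast]
  have hs2 : PySem.List.slice s2 (some 0) (some (i : Int)) = s2.take i := by
    simp
  have hs1 : PySem.List.slice s1 (some (-(i : Int))) (some (-1)) =
      (s1.drop (s1.length - i)).dropLast := by
    simp only [PySem.List.slice, PySem.List.clampIdx_neg_natCast _ _ (by omega : 0 < i),
      PySem.List.clampIdx_neg_one]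
    rw [List.dropLast_eq_take, List.length_drop]
    congr 1
    omega
  have hD : (s1.drop (s1.length - i)).length = i := by simp; omega
  have hDne : s1.drop (s1.length - i) ≠ [] := by
    intro h; rw [h] at hD; simp at hD; omega
  have hlast2 : s1.getLast hne = (s1.drop (s1.length - i)).getLast hDne := by
    rw [List.getLast_drop]
  have hjoin : (s1.drop (s1.length - i)).dropLast ++ [s1.getLast hne] = s1.drop (s1.length - i) := by
    rw [hlast2, List.dropLast_append_getLast]
  have hcond : (PySem.List.slice s1 (some (-(i : Int))) (some (-1)) ++ [s1.getLast hne]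
        = PySem.List.slice s2 (some 0) (some (i : Int)))
      ↔ (s1.drop (s1.length - i) = s2.take i) := by
    rw [hs1, hs2, hjoin]
  unfold spliceBodyA
  rw [hlast]
  dsimp only
  by_cases hE : s1.drop (s1.length - i) = s2.take i
  · rw [if_pos (hcond.mpr hE), hs2, if_pos hE]
  · rw [if_neg (fun h => hE (hcond.mp h)), if_neg hE]

-- A's ascending keep-last loop over range(2, t) equals B's descending hash-filtered
-- first-hit scan from t-1 (the filter never rejects a real match, by hash_complete)
lemma loop_eq_overlapB (s1 s2 : List Char) : ∀ t : Nat, t ≤ min s1.length s2.length →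
    (PySem.List.pyRange 2 (t : Int)).foldl (spliceBodyA s1 s2) [] =
      overlapB s1 s2 (hprefs 0 s1) (hprefs 0 s2) s1.length (t - 1) := by
  intro t
  induction t with
  | zero => intro _; simp [PySem.List.pyRange_one_eq_nil (by omega : (0:Int) ≤ 2), overlapB]
  | succ t ih =>
    intro ht
    by_cases hle : t + 1 ≤ 2
    · have h01 : t = 0 ∨ t = 1 := by omega
      rcases h01 with rfl | rfl
      · simp [overlapB]
      · simp [overlapB]
    · have h2t : 2 ≤ t := by omega
      have hr : PySem.List.pyRange 2 ((t + 1 : Nat) : Int) =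
          PySem.List.pyRange 2 (t : Int) ++ [(t : Int)] := by
        push_cast
        exact PySem.List.pyRange_one_succ_right (by exact_mod_cast h2t)
      rw [hr, List.foldl_append]
      simp only [List.foldl]
      rw [ih (by omega), spliceBodyA_eq s1 s2 _ t h2t (by omega) (by omega)]
      obtain ⟨k, rfl⟩ : ∃ k, t = k + 2 := ⟨t - 2, by omega⟩
      have he : k + 2 + 1 - 1 = k + 2 := by omega
      have he2 : k + 2 - 1 = k + 1 := by omega
      rw [he, he2]
      -- B's combined condition collapses to the substring equality
      by_cases hE : s1.drop (s1.length - (k + 2)) = s2.take (k + 2)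
      · rw [if_pos hE]
        simp only [overlapB]
        rw [if_pos ⟨hash_complete s1 s2 (k + 2) (by omega) (by omega) (by omega) hE, hE⟩]
      · rw [if_neg hE]
        simp only [overlapB]
        rw [if_neg (fun h => hE h.2)]

-- the two ports agree on the shared preprocessed strings
lemma splicing_eq_core (s1 s2 : List Char) :
    (let f1 := (PySem.List.pyRange 2 (min (PySem.Chars.len s1) (PySem.Chars.len s2))).foldl
                 (spliceBodyA s1 s2) [];
     let str3 := PySem.Chars.replace
         (PySem.Chars.replace s1 f1 [] ++ ['/'] ++ f1 ++ ['/'] ++ PySem.Chars.replace s2 f1 [])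
         ['/', '/'] ['/'];
     let x := PySem.Chars.find str3 ['/'];
     if x ≠ -1
     then PySem.List.slice str3 none (some x) ++ ['/'] ++ PySem.List.slice str3 (some x) none
     else str3)
    =
    (let f1 := overlapB s1 s2 (hprefs 0 s1) (hprefs 0 s2) s1.length (min s1.length s2.length - 1);
     let out := PySem.Chars.replace
         (PySem.Chars.replace s1 f1 [] ++ ['/'] ++ f1 ++ ['/'] ++ PySem.Chars.replace s2 f1 [])
         ['/', '/'] ['/'];
     let i := PySem.Chars.find out ['/'];
     if i = -1
     then out
     else PySem.List.slice out none (some i) ++ ['/'] ++ PySem.List.slice out (some i) none) := by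
  have hf : (PySem.List.pyRange 2 (min (PySem.Chars.len s1) (PySem.Chars.len s2))).foldl
      (spliceBodyA s1 s2) [] =
        overlapB s1 s2 (hprefs 0 s1) (hprefs 0 s2) s1.length (min s1.length s2.length - 1) := by
    simp only [PySem.Chars.len_eq, ← Nat.cast_min]
    exact loop_eq_overlapB s1 s2 _ le_rfl
  simp only [hf]
  exact ite_ne_swap _ _ _

-- ===== VERDICT (by name: the statement is the Claim_ definition above) =====
theorem splicing_spec : Claim_equal_splicing := by
  intro var1 var2 _
  show splicing var1 var2 = splicing_alt var1 var2
  exact congrArg String.ofList (splicing_eq_core _ _)
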